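-- pv_equiv track=rewrite | github.com/EfeTemlisu/MyGhost | main.py | day_to_hicri
-- ===== SOURCE A (Python) =====
-- def is_leak_hicri(year):
--     if year % 30 == 2 or year % 30 == 5 or year % 30 == 7 or year % 30 == 10 or year % 30 == 13 or year % 30 == 15 or year % 30 == 18 or year % 30 == 21 or year % 30 == 24 or year % 30 == 24 or year % 30 == 26 or year % 30 == 25:
--         return True
--     else:
--         return False
--
-- def next_year_hicri(day, month,year):
--     return 1,1, year +1
--
-- def next_month_hicri(day,month,year):
--     if month != 12:
--         return 1,month+1,year
--     else:
--         return next_year_hicri(day,month,year)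
--
-- def next_day_hicri(day,month,year):
--     if is_leak_hicri(year):
--         days_in_month = [30,29,30,29,30,29,30,29,30,29,30,30]
--     else:
--          days_in_month = [30,29,30,29,30,29,30,29,30,29,30,29]
--     if day == days_in_month[month -1]:
--         return next_month_hicri(day,month,year)
--     else:
--         return day+1,month,year
--
-- def day_to_hicri(days):
--     start_day = 1
--     start_month = 1
--     start_year = 1
--     while True:
--         if days == 0:
--             break
--         days-=1
--         start_day, start_month, start_year = next_day_hicri(start_day, start_month, start_year)
--     return start_day, start_month, start_year
-- ===== SOURCE B (Python) =====
-- def day_to_hicri(days):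
--     # O(1): index into the 30-year cycle (10631 days) by division, then
--     # bounded scans over at most 30 years and 11 months.
--     q, r = divmod(days, 10631)
--     y = 30 * q + 1
--     for _ in range(30):
--         L = 355 if y % 30 in (2, 5, 7, 10, 13, 15, 18, 21, 24, 25, 26) else 354
--         if r < L:
--             break
--         r -= L
--         y += 1
--     leap = y % 30 in (2, 5, 7, 10, 13, 15, 18, 21, 24, 25, 26)
--     m = 1
--     for dm in (30, 29, 30, 29, 30, 29, 30, 29, 30, 29, 30):
--         if r < dm:
--             break
--         r -= dm
--         m += 1
--     return r + 1, m, y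
-- ===== Notes on version B (the rewrite author's own statement) =====
-- stated objective: faster
-- what changed: A steps through the calendar one day at a time (days iterations of next_day_hicri); B jumps straight to the right 30-year cycle with divmod(days, 10631) and then locates the year and month with two small bounded scans.
import Mathlib
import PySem

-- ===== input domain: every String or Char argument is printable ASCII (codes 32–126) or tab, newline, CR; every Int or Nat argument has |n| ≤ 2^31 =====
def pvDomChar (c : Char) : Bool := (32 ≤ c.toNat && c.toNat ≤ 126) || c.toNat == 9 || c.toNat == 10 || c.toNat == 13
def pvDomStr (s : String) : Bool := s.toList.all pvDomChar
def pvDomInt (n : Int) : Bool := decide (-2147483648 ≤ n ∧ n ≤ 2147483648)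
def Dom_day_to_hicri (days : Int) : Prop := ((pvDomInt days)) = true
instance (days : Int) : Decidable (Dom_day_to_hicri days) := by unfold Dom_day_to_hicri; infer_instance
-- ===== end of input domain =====

-- B replaces A's day-by-day stepping loop with direct indexing into the 30-year
-- cycle (10631 days) by division, plus bounded year/month scans (objective: faster).

-- ===== PORT A =====
def is_leak_hicri (year : Int) : Bool :=
  PySem.Int.mod year 30 == 2 || PySem.Int.mod year 30 == 5 || PySem.Int.mod year 30 == 7 ||
  PySem.Int.mod year 30 == 10 || PySem.Int.mod year 30 == 13 || PySem.Int.mod year 30 == 15 ||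
  PySem.Int.mod year 30 == 18 || PySem.Int.mod year 30 == 21 || PySem.Int.mod year 30 == 24 ||
  PySem.Int.mod year 30 == 24 || PySem.Int.mod year 30 == 26 || PySem.Int.mod year 30 == 25

def next_year_hicri (_day _month year : Int) : Int × Int × Int := (1, 1, year + 1)

def next_month_hicri (day month year : Int) : Int × Int × Int :=
  if month ≠ 12 then (1, month + 1, year) else next_year_hicri day month year

def next_day_hicri (day month year : Int) : Int × Int × Int :=
  let days_in_month : List Int :=
    if is_leak_hicri year then [30,29,30,29,30,29,30,29,30,29,30,30]
    else [30,29,30,29,30,29,30,29,30,29,30,29]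
  -- `day == days_in_month[month-1]`; pyGet? is exact (the index is in range on every reachable state)
  if PySem.List.pyGet? days_in_month (month - 1) == some day then
    next_month_hicri day month year
  else (day + 1, month, year)

def day_to_hicri_go : Nat → Int × Int × Int → Int × Int × Int
  | 0, s => s
  | n + 1, (d, m, y) => day_to_hicri_go n (next_day_hicri d m y)

def day_to_hicri (days : Int) : List Int :=
  -- the while loop runs exactly `days` iterations when days ≥ 0 (Pre_); it diverges for days < 0
  let s := day_to_hicri_go days.toNat (1, 1, 1)
  [s.1, s.2.1, s.2.2]

-- ===== PORT B =====
def hicriLeapAlt (y : Int) : Bool :=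
  ([2,5,7,10,13,15,18,21,24,25,26] : List Int).contains (PySem.Int.mod y 30)

def hicriYearScan : Nat → Int × Int → Int × Int
  | 0, s => s
  | f + 1, (r, y) =>
    let L : Int := if hicriLeapAlt y then 355 else 354
    if r < L then (r, y) else hicriYearScan f (r - L, y + 1)

def hicriMonthScan : List Int → Int × Int → Int × Int
  | [], s => s
  | dm :: rest, (r, m) => if r < dm then (r, m) else hicriMonthScan rest (r - dm, m + 1)

def day_to_hicri_altCore (days : Int) : Int × Int × Int :=
  let q := PySem.Int.floordiv days 10631
  let r0 := PySem.Int.mod days 10631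
  let p1 := hicriYearScan 30 (r0, 30 * q + 1)
  let p2 := hicriMonthScan [30,29,30,29,30,29,30,29,30,29,30] (p1.1, 1)
  (p2.1 + 1, p2.2, p1.2)

def day_to_hicri_alt (days : Int) : List Int :=
  let s := day_to_hicri_altCore days
  [s.1, s.2.1, s.2.2]

-- ===== PRECONDITION & SPEC =====
-- Pre_ excludes days < 0, on which A's while loop never terminates (A returns on every days ≥ 0).
def Pre_day_to_hicri (days : Int) : Prop := 0 ≤ days
instance (days : Int) : Decidable (Pre_day_to_hicri days) := by unfold Pre_day_to_hicri; infer_instance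
def pvWitness_day_to_hicri : Int := 400

def Spec_day_to_hicri (days : Int) (out : List Int) : Prop := out = day_to_hicri_alt days
instance (days : Int) (out : List Int) : Decidable (Spec_day_to_hicri days out) := by unfold Spec_day_to_hicri; infer_instance

-- ===== CLAIM (what is proved, stated in full; the proofs are below) =====
def Claim_equal_day_to_hicri : Prop := ∀ (days : Int), Dom_day_to_hicri days → Pre_day_to_hicri days → Spec_day_to_hicri days (day_to_hicri days)

-- ===== LEMMAS AND PROOFS =====

-- proof-side abbreviations
def hicriYlen (y : Int) : Int := if hicriLeapAlt y then 355 else 354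

def hicriYlist (y : Int) : Nat → List Int
  | 0 => []
  | f + 1 => hicriYlen y :: hicriYlist (y + 1) f

-- the 30 year lengths of one cycle starting at a year ≡ 1 (mod 30)
def hicriCL : List Int := hicriYlist 1 30

def hicriScanM (r : Int) : Int × Int :=
  hicriMonthScan [30,29,30,29,30,29,30,29,30,29,30] (r, 1)

-- (day, month, year) from a day-offset r inside year y
def hicriHdm (r y : Int) : Int × Int × Int :=
  ((hicriScanM r).1 + 1, (hicriScanM r).2, y)

def hicriGys (ys : List Int) (r y : Int) : Int × Int × Int :=
  let p := hicriMonthScan ys (r, y)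
  hicriHdm p.1 p.2

def hicriStep (s : Int × Int × Int) : Int × Int × Int := next_day_hicri s.1 s.2.1 s.2.2

-- A's step with the year dependency split out: (day', month', year-wrapped?)
def hicriStepDM (b : Bool) (d m : Int) : Int × Int × Bool :=
  let dim : List Int :=
    if b then [30,29,30,29,30,29,30,29,30,29,30,30] else [30,29,30,29,30,29,30,29,30,29,30,29]
  if PySem.List.pyGet? dim (m - 1) == some d then
    (if m ≠ 12 then (1, m + 1, false) else (1, 1, true))
  else (d + 1, m, false)

theorem hicri_leapAlt_shift (y k : Int) : hicriLeapAlt (y + 30 * k) = hicriLeapAlt y := by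
  simp [hicriLeapAlt]

theorem hicri_leak_eq (y : Int) : is_leak_hicri y = hicriLeapAlt y := by
  have h1 : (0:Int) ≤ y % 30 := Int.emod_nonneg y (by norm_num)
  have h2 : y % 30 < 30 := Int.emod_lt_of_pos y (by norm_num)
  have hm : PySem.Int.mod y 30 = y % 30 := PySem.Int.mod_eq_emod_of_pos (by norm_num)
  unfold is_leak_hicri hicriLeapAlt
  rw [hm]
  interval_cases h : (y % 30) <;> rfl

theorem hicri_step_split (d m y : Int) :
    next_day_hicri d m y =
      (let t := hicriStepDM (is_leak_hicri y) d m; (t.1, t.2.1, if t.2.2 then y + 1 else y)) := by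
  unfold next_day_hicri hicriStepDM next_month_hicri next_year_hicri
  split_ifs <;> simp_all <;> split_ifs <;> simp_all

theorem hicri_yearScan_eq (f : Nat) (r y : Int) :
    hicriYearScan f (r, y) = hicriMonthScan (hicriYlist y f) (r, y) := by
  induction f generalizing r y with
  | zero => rfl
  | succ f ih =>
    show (if r < hicriYlen y then (r, y) else hicriYearScan f (r - hicriYlen y, y + 1)) = _
    rw [show hicriYlist y (f + 1) = hicriYlen y :: hicriYlist (y + 1) f from rfl]
    show _ = (if r < hicriYlen y then (r, y) else hicriMonthScan (hicriYlist (y + 1) f) (r - hicriYlen y, y + 1))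
    split_ifs <;> simp [ih]

theorem hicri_ylist_shift (k : Int) (f : Nat) : ∀ y : Int, hicriYlist (y + 30 * k) f = hicriYlist y f := by
  induction f with
  | zero => intro y; rfl
  | succ f ih =>
    intro y
    show hicriYlen (y + 30 * k) :: hicriYlist (y + 30 * k + 1) f = hicriYlen y :: hicriYlist (y + 1) f
    rw [show y + 30 * k + 1 = (y + 1) + 30 * k by ring, ih (y + 1)]
    unfold hicriYlen
    rw [hicri_leapAlt_shift]

theorem hicri_ylist_cycle (k : Int) : hicriYlist (30 * k + 1) 30 = hicriCL := by
  rw [show (30 * k + 1 : Int) = 1 + 30 * k by ring, hicri_ylist_shift k 30 1]; rfl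

theorem hicri_ylist_mem_pos {d : Int} {y : Int} {f : Nat} (h : d ∈ hicriYlist y f) : 0 < d := by
  induction f generalizing y with
  | zero => simp [hicriYlist] at h
  | succ f ih =>
    rw [show hicriYlist y (f + 1) = hicriYlen y :: hicriYlist (y + 1) f from rfl] at h
    rcases List.mem_cons.1 h with h | h
    · subst h; unfold hicriYlen; split_ifs <;> norm_num
    · exact ih h

theorem hicri_scan_zero {ls : List Int} (hpos : ∀ d ∈ ls, 0 < d) (m : Int) :
    hicriMonthScan ls (0, m) = (0, m) := by
  cases ls with
  | nil => rfl
  | cons d rest =>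
    show (if (0:Int) < d then ((0:Int), m) else _) = _
    rw [if_pos (hpos d (List.mem_cons_self))]

-- within-year successor, year dependency reduced to the leap flag (checked by decide)
set_option maxRecDepth 10000 in
set_option maxHeartbeats 1000000 in
theorem hicri_dec1 : ∀ (b : Bool) (r : Fin 355), r.val + 1 < (if b then 355 else 354) →
    hicriStepDM b ((hicriScanM (r.val : Int)).1 + 1) ((hicriScanM (r.val : Int)).2) =
      ((hicriScanM ((r.val : Int) + 1)).1 + 1, (hicriScanM ((r.val : Int) + 1)).2, false) := by
  decide

theorem hicri_wrapd : ∀ b : Bool,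
    hicriStepDM b ((hicriScanM ((if b then 355 else 354) - 1)).1 + 1)
        ((hicriScanM ((if b then 355 else 354) - 1)).2) = (1, 1, true) := by
  decide

theorem hicri_W (r y : Int) (h0 : 0 ≤ r) (h1 : r + 1 < hicriYlen y) :
    hicriHdm (r + 1) y = hicriStep (hicriHdm r y) := by
  have hb : hicriYlen y = if is_leak_hicri y then 355 else 354 := by
    rw [hicri_leak_eq]; rfl
  have h1' : r + 1 < (if is_leak_hicri y then (355:Int) else 354) := by rw [← hb]; exact h1
  have hr355 : r < 355 := by split_ifs at h1' <;> omega
  have hcast : ((r.toNat : Nat) : Int) = r := Int.toNat_of_nonneg h0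
  have hcond : (⟨r.toNat, by omega⟩ : Fin 355).val + 1 < (if is_leak_hicri y then 355 else 354) := by
    show r.toNat + 1 < (if is_leak_hicri y then 355 else 354)
    split_ifs at h1' ⊢ <;> omega
  have key := hicri_dec1 (is_leak_hicri y) ⟨r.toNat, by omega⟩ hcond
  rw [show ((⟨r.toNat, by omega⟩ : Fin 355).val : Int) = ((r.toNat : Nat) : Int) from rfl, hcast] at key
  show _ = hicriStep ((hicriScanM r).1 + 1, (hicriScanM r).2, y)
  unfold hicriStep
  rw [hicri_step_split]
  simp only [key]
  rfl

-- the main induction: successor commutes with the year scan over a run of true year lengths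
theorem hicri_L1 : ∀ (ys : List Int) (y r : Int), ys = hicriYlist y ys.length → 0 ≤ r →
    r + 1 ≤ ys.sum → hicriGys ys (r + 1) y = hicriStep (hicriGys ys r y) := by
  intro ys
  induction ys with
  | nil =>
    intro y r _ h0 h1
    simp at h1; omega
  | cons e rest ih =>
    intro y r hsh h0 h1
    have he : e = hicriYlen y := by
      have := congrArg (fun l => l.headI) hsh; simpa using this
    have hrest : rest = hicriYlist (y + 1) rest.length := by
      have := congrArg (fun l => l.tail) hsh; simpa using this
    have hepos : 0 < e := by rw [he]; unfold hicriYlen; split_ifs <;> norm_num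
    by_cases hlt : r + 1 < e
    · -- both land in year y
      have hscan1 : hicriMonthScan (e :: rest) (r + 1, y) = (r + 1, y) := by
        show (if r + 1 < e then (r + 1, y) else _) = _
        rw [if_pos hlt]
      have hscan0 : hicriMonthScan (e :: rest) (r, y) = (r, y) := by
        show (if r < e then (r, y) else _) = _
        rw [if_pos (by omega)]
      unfold hicriGys
      rw [hscan1, hscan0]
      exact hicri_W r y h0 (he ▸ hlt)
    · by_cases heq : r + 1 = e
      · -- last day of year y → first day of year y+1
        have hscan1 : hicriMonthScan (e :: rest) (r + 1, y) = (0, y + 1) := by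
          show (if r + 1 < e then (r + 1, y) else hicriMonthScan rest (r + 1 - e, y + 1)) = _
          rw [if_neg hlt, show r + 1 - e = 0 by omega]
          exact hicri_scan_zero (fun d hd => hicri_ylist_mem_pos (hrest ▸ hd)) _
        have hscan0 : hicriMonthScan (e :: rest) (r, y) = (r, y) := by
          show (if r < e then (r, y) else _) = _
          rw [if_pos (by omega)]
        unfold hicriGys
        rw [hscan1, hscan0]
        have hL : hicriHdm 0 (y + 1) = (1, 1, y + 1) := by
          unfold hicriHdm hicriScanM
          norm_num [hicriMonthScan]
        rw [hL]
        have hb : hicriYlen y = if is_leak_hicri y then 355 else 354 := by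
          rw [hicri_leak_eq]; rfl
        have hrr : r = (if is_leak_hicri y then 355 else 354) - 1 := by
          rw [← hb, ← he]; omega
        show _ = hicriStep ((hicriScanM r).1 + 1, (hicriScanM r).2, y)
        unfold hicriStep
        rw [hicri_step_split]
        rw [hrr]
        simp only [hicri_wrapd (is_leak_hicri y)]
        simp
      · -- r lands beyond year y: recurse
        have hge : e ≤ r := by omega
        have hscan1 : hicriMonthScan (e :: rest) (r + 1, y) = hicriMonthScan rest (r + 1 - e, y + 1) := by
          show (if r + 1 < e then _ else hicriMonthScan rest (r + 1 - e, y + 1)) = _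
          rw [if_neg hlt]
        have hscan0 : hicriMonthScan (e :: rest) (r, y) = hicriMonthScan rest (r - e, y + 1) := by
          show (if r < e then _ else hicriMonthScan rest (r - e, y + 1)) = _
          rw [if_neg (by omega)]
        unfold hicriGys
        rw [hscan1, hscan0]
        have := ih (y + 1) (r - e) hrest (by omega)
          (by have hsum : (e :: rest).sum = e + rest.sum := by simp
              omega)
        rw [show r + 1 - e = (r - e) + 1 by ring]
        unfold hicriGys at this
        exact this

theorem hicri_altCore_eq (n : Nat) :
    day_to_hicri_altCore (n : Int) =
      hicriGys hicriCL ((n % 10631 : Nat) : Int) (30 * ((n / 10631 : Nat) : Int) + 1) := by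
  have hfd : PySem.Int.floordiv (n : Int) 10631 = ((n / 10631 : Nat) : Int) := by
    exact_mod_cast PySem.Int.floordiv_natCast n 10631
  have hmd : PySem.Int.mod (n : Int) 10631 = ((n % 10631 : Nat) : Int) := by
    exact_mod_cast PySem.Int.mod_natCast n 10631
  simp only [day_to_hicri_altCore, hicriGys, hfd, hmd, hicri_yearScan_eq, hicri_ylist_cycle]
  rfl

theorem hicri_CL_shape : hicriCL = hicriYlist (30 * (k : Int) + 1) (hicriCL.length) := by
  rw [show hicriCL.length = 30 from rfl, hicri_ylist_cycle]

theorem hicri_altCore_succ (n : Nat) :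
    day_to_hicri_altCore ((n + 1 : Nat) : Int) = hicriStep (day_to_hicri_altCore (n : Int)) := by
  rw [hicri_altCore_eq, hicri_altCore_eq]
  have hlt : n % 10631 < 10631 := by omega
  by_cases hcase : n % 10631 < 10630
  · have hq : (n + 1) / 10631 = n / 10631 := by omega
    have hr : (n + 1) % 10631 = n % 10631 + 1 := by omega
    rw [hq, hr]
    push_cast
    exact hicri_L1 hicriCL _ _ (hicri_CL_shape) (Int.natCast_nonneg _)
      (by have : ((n % 10631 : Nat) : Int) ≤ 10629 := by exact_mod_cast Nat.le_of_lt_succ (by omega)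
          have hsum : hicriCL.sum = 10631 := by decide
          omega)
  · -- cycle boundary: n % 10631 = 10630
    have hr0 : n % 10631 = 10630 := by omega
    have hq : (n + 1) / 10631 = n / 10631 + 1 := by omega
    have hr : (n + 1) % 10631 = 0 := by omega
    rw [hq, hr, hr0]
    simp only [Nat.cast_add, Nat.cast_ofNat, Nat.cast_one, Nat.cast_zero]
    have hstep := hicri_L1 hicriCL (30 * ((n / 10631 : Nat) : Int) + 1) 10630 (hicri_CL_shape)
      (by norm_num) (by rw [show hicriCL.sum = 10631 from by decide]; norm_num)
    rw [show (10630 : Int) + 1 = 10631 from rfl] at hstep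
    -- both sides are the first day of the next cycle
    have hCL : hicriCL = [354,355,354,354,355,354,355,354,354,355,354,354,355,354,355,354,354,355,354,354,355,354,354,355,355,355,354,354,354,354] := by decide
    have hall : ∀ y : Int, hicriGys hicriCL 10631 y = (1, 1, y + 30) := by
      intro y
      rw [hCL]
      norm_num [hicriGys, hicriMonthScan, hicriHdm, hicriScanM]
      ring
    have hzero : ∀ y : Int, hicriGys hicriCL 0 y = (1, 1, y) := by
      intro y
      rw [hCL]
      norm_num [hicriGys, hicriMonthScan, hicriHdm, hicriScanM]
    rw [hzero, ← hstep, hall]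
    simp only [Prod.mk.injEq, true_and]
    ring

theorem hicri_go_succ_out (n : Nat) (s : Int × Int × Int) :
    day_to_hicri_go (n + 1) s = hicriStep (day_to_hicri_go n s) := by
  induction n generalizing s with
  | zero => obtain ⟨d, m, y⟩ := s; rfl
  | succ n ih =>
    obtain ⟨d, m, y⟩ := s
    show day_to_hicri_go (n + 1) (next_day_hicri d m y) = _
    rw [ih (next_day_hicri d m y)]
    rfl

theorem hicri_go_eq_altCore (n : Nat) :
    day_to_hicri_go n (1, 1, 1) = day_to_hicri_altCore (n : Int) := by
  induction n with
  | zero => decide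
  | succ n ih =>
    rw [hicri_go_succ_out, ih]
    exact (hicri_altCore_succ n).symm

-- ===== VERDICT (by name: the statement is the Claim_ definition above) =====
theorem day_to_hicri_spec : Claim_equal_day_to_hicri := by
  intro days _hdom hpre
  unfold Spec_day_to_hicri day_to_hicri day_to_hicri_alt
  have h : ((days.toNat : Nat) : Int) = days := Int.toNat_of_nonneg hpre
  rw [hicri_go_eq_altCore, h]
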